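-- pv_equiv track=rewrite | github.com/AtuelFullana/algoritmos-1 | tp3.py | lista_en_decimal
-- ===== SOURCE A (Python) =====
-- from typing import List, Tuple, Any
--
-- def lista_en_decimal(colores: dict) -> List[List[int]]:
--     '''Recibe un diccionario con todas las casillas y sus respectivos colores,
--     y devuelve una lista de listas con todos los colores'''
--     lista_decimal = []
--     lista_vacia = []
--     for clave,valor in colores.items():
--         for e in valor:
--             if len(lista_vacia) != 3:
--                 lista_vacia.append(int(e))
--                 if len(lista_vacia) == 3:
--                     lista_decimal.append(lista_vacia)
--                     lista_vacia = []
--     return lista_decimal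
-- ===== SOURCE B (Python) =====
-- from typing import List
--
-- def lista_en_decimal(colores: dict) -> List[List[int]]:
--     '''Recibe un diccionario con todas las casillas y sus respectivos colores,
--     y devuelve una lista de listas con todos los colores'''
--     flat = [int(e) for valor in colores.values() for e in valor]
--     return [flat[i:i + 3] for i in range(0, len(flat) // 3 * 3, 3)]
-- ===== Notes on version B (the rewrite author's own statement) =====
-- stated objective: simpler
-- what changed: Replaces the stateful 3-element buffer with its emit-on-fill branch by a flatten pass followed by index-stepped slicing into complete triplets.
import Mathlib
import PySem

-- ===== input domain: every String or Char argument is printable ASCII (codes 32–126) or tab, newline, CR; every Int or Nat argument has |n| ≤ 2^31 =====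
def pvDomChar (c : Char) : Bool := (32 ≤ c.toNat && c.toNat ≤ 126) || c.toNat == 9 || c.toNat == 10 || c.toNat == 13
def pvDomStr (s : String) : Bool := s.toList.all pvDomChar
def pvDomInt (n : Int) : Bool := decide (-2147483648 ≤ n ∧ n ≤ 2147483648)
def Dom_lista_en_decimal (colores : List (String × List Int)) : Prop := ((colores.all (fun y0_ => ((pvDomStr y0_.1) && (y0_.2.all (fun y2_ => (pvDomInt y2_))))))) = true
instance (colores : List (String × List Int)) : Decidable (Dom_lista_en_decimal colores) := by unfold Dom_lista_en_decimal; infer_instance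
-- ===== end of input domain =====

-- B replaces A's stateful 3-element buffer with a flatten pass followed by
-- index-stepped slicing into complete triplets (objective: simpler).


-- ===== PORT A =====
-- A's inner loop body: append int(e) to the buffer unless it is full; emit on fill.
def lista_en_decimal_step (st : List (List Int) × List Int) (e : Int) :
    List (List Int) × List Int :=
  if st.2.length ≠ 3 then
    let buf := st.2 ++ [e]
    if buf.length = 3 then (st.1 ++ [buf], []) else (st.1, buf)
  else st

def lista_en_decimal (colores : List (String × List Int)) : List (List Int) :=
  let st := colores.foldl
    (fun st kv => kv.2.foldl lista_en_decimal_step st) (([], []) : List (List Int) × List Int)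
  st.1

-- ===== PORT B =====
def lista_en_decimal_alt (colores : List (String × List Int)) : List (List Int) :=
  let flat := colores.flatMap (fun kv => kv.2)
  (PySem.List.pyRange 0 (PySem.Int.floordiv (flat.length : Int) 3 * 3) 3).map
    (fun i => PySem.List.slice flat (some i) (some (i + 3)))

-- ===== PRECONDITION & SPEC =====
def Spec_lista_en_decimal (colores : List (String × List Int)) (out : List (List Int)) : Prop := out = lista_en_decimal_alt colores
instance (colores : List (String × List Int)) (out : List (List Int)) : Decidable (Spec_lista_en_decimal colores out) := by unfold Spec_lista_en_decimal; infer_instance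

-- ===== CLAIM (what is proved, stated in full; the proofs are below) =====
def Claim_equal_lista_en_decimal : Prop := ∀ (colores : List (String × List Int)), Dom_lista_en_decimal colores → Spec_lista_en_decimal colores (lista_en_decimal colores)

-- ===== LEMMAS AND PROOFS =====
-- Common reference: chunk a flat list into complete triplets.
def pvChunk3 : List Int → List (List Int)
  | [] => []
  | [_] => []
  | [_, _] => []
  | a :: b :: c :: r => [a, b, c] :: pvChunk3 r

theorem lista_en_decimal_loop_eq (flat : List Int) :
    ∀ acc : List (List Int),
      (flat.foldl lista_en_decimal_step (acc, [])).1 = acc ++ pvChunk3 flat := by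
  induction flat using pvChunk3.induct with
  | case1 => intro acc; simp [pvChunk3]
  | case2 a => intro acc; simp [pvChunk3, lista_en_decimal_step]
  | case3 a b => intro acc; simp [pvChunk3, lista_en_decimal_step]
  | case4 a b c r ih =>
      intro acc
      have h1 : lista_en_decimal_step (acc, []) a = (acc, [a]) := by
        simp [lista_en_decimal_step]
      have h2 : lista_en_decimal_step (acc, [a]) b = (acc, [a, b]) := by
        simp [lista_en_decimal_step]
      have h3 : lista_en_decimal_step (acc, [a, b]) c = (acc ++ [[a, b, c]], []) := by
        simp [lista_en_decimal_step]
      simp only [List.foldl_cons, h1, h2, h3, pvChunk3]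
      rw [ih (acc ++ [[a, b, c]])]
      simp

theorem lista_en_decimal_A_eq (colores : List (String × List Int)) :
    lista_en_decimal colores = pvChunk3 (colores.flatMap (fun kv => kv.2)) := by
  unfold lista_en_decimal
  rw [← List.foldl_flatMap]
  simpa using lista_en_decimal_loop_eq (colores.flatMap (fun kv => kv.2)) []

theorem pvChunk3_eq_range (flat : List Int) :
    (List.range (flat.length / 3)).map (fun j => (flat.drop (3 * j)).take 3) =
      pvChunk3 flat := by
  induction flat using pvChunk3.induct with
  | case1 => simp [pvChunk3]
  | case2 a => simp [pvChunk3]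
  | case3 a b => simp [pvChunk3]
  | case4 a b c r ih =>
      have hlen : (a :: b :: c :: r).length / 3 = r.length / 3 + 1 := by
        simp [List.length_cons]; omega
      rw [hlen, List.range_succ_eq_map, pvChunk3]
      simp only [List.map_cons, Nat.mul_zero, List.drop_zero, List.map_map]
      have h1 : List.take 3 (a :: b :: c :: r) = [a, b, c] := rfl
      rw [h1, ← ih]
      refine congrArg (List.cons [a, b, c]) ?_
      apply List.map_congr_left
      intro j _
      have h2 : 3 * Nat.succ j = (3 * j) + 1 + 1 + 1 := by omega
      simp [Function.comp, h2, List.drop_succ_cons]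

theorem pvB_chunk_eq (flat : List Int) :
    (PySem.List.pyRange 0 (PySem.Int.floordiv (flat.length : Int) 3 * 3) 3).map
      (fun i => PySem.List.slice flat (some i) (some (i + 3))) = pvChunk3 flat := by
  have hfd : PySem.Int.floordiv (flat.length : Int) 3 * 3 =
      ((3 * (flat.length / 3) : Nat) : Int) := by
    simp only [PySem.Int.floordiv]
    rw [Int.fdiv_eq_ediv]
    simp
    omega
  rw [hfd, PySem.List.pyRange_of_pos _ _ (by norm_num : (0:Int) < 3)]
  rw [← pvChunk3_eq_range flat]
  have hcount : (if (0:Int) < ((3 * (flat.length / 3) : Nat) : Int) then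
      ((((3 * (flat.length / 3) : Nat) : Int) - 0 + 3 - 1) / 3).toNat else 0) =
      flat.length / 3 := by
    split <;> omega
  rw [hcount, List.map_map]
  apply List.map_congr_left
  intro j _
  have : (0 : Int) + 3 * (j : Int) = ((3 * j : Nat) : Int) := by push_cast; ring
  simp only [Function.comp, this]
  have h3 : ((3 * j : Nat) : Int) + 3 = ((3 * j : Nat) : Int) + ((3 : Nat) : Int) := by
    norm_num
  rw [h3, PySem.List.slice_natCast_add]

theorem lista_en_decimal_B_eq (colores : List (String × List Int)) :
    lista_en_decimal_alt colores = pvChunk3 (colores.flatMap (fun kv => kv.2)) :=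
  pvB_chunk_eq _

-- ===== VERDICT (by name: the statement is the Claim_ definition above) =====
theorem lista_en_decimal_spec : Claim_equal_lista_en_decimal := by
  intro colores _
  unfold Spec_lista_en_decimal
  rw [lista_en_decimal_A_eq, lista_en_decimal_B_eq]
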